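-- pv_equiv track=rewrite | github.com/Segeyfru/DI-BootCamp | Week-4/Day4/HW/menu_editor.py | check
-- ===== SOURCE A (Python) =====
-- def check(string):
--     string_without = string.replace(' ','')
--     if  all(char.isalpha() for char in string_without):
--         return True
--     elif all(char.isdigit() for char in string_without):
--         return True
--     else:
--         return False
-- ===== SOURCE B (Python) =====
-- def check(string):
--     # Counting approach: tally character classes, then decide by arithmetic on the
--     # totals: the string (ignoring spaces) is all-alpha iff alphas + spaces == len,
--     # all-digit iff digits + spaces == len (the classes are mutually disjoint).
--     alphas = sum(1 for c in string if c.isalpha())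
--     digits = sum(1 for c in string if c.isdigit())
--     spaces = sum(1 for c in string if c == ' ')
--     n = len(string)
--     return alphas + spaces == n or digits + spaces == n
-- ===== Notes on version B (the rewrite author's own statement) =====
-- stated objective: alternative
-- what changed: Replaces strip-spaces plus two short-circuiting all() boolean scans with a counting algorithm: tally alphabetic, digit and space characters and decide by comparing counts to the string length, which is equivalent because the three classes are disjoint.
import Mathlib
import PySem

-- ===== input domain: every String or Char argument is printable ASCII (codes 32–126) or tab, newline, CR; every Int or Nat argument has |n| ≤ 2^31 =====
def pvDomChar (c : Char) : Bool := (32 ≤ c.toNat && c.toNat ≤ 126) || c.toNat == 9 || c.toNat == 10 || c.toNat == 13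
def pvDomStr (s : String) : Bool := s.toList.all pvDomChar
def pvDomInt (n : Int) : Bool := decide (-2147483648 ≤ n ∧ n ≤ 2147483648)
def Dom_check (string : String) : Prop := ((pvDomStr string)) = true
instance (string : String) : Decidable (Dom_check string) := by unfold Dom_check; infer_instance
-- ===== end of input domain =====

-- B replaces A's strip-spaces + two all() boolean scans with a counting algorithm:
-- tally alpha / digit / space characters and decide by comparing counts with the length.

-- ===== PORT A =====
def check (string : String) : Bool :=
  let string_without := PySem.Str.replace string " " ""
  if string_without.toList.all (fun char => PySem.Chars.isalpha char) then
    true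
  else if string_without.toList.all (fun char => PySem.Chars.isdigit char) then
    true
  else
    false

-- ===== PORT B =====
def check_alt (string : String) : Bool :=
  let l := string.toList
  let alphas := l.foldl (fun acc c => if PySem.Chars.isalpha c then acc + 1 else acc) 0
  let digits := l.foldl (fun acc c => if PySem.Chars.isdigit c then acc + 1 else acc) 0
  let spaces := l.foldl (fun acc c => if c == ' ' then acc + 1 else acc) 0
  let n := l.length
  (alphas + spaces == n) || (digits + spaces == n)

-- ===== PRECONDITION & SPEC =====
def Spec_check (string : String) (out : Bool) : Prop := out = check_alt string
instance (string : String) (out : Bool) : Decidable (Spec_check string out) := by unfold Spec_check; infer_instance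

-- ===== CLAIM (what is proved, stated in full; the proofs are below) =====
def Claim_equal_check : Prop := ∀ (string : String), Dom_check string → Spec_check string (check string)

-- ===== LEMMAS AND PROOFS =====

-- replace(' ','') on a char list is the filter removing spaces
theorem replace_go_space (fuel : Nat) (l acc : List Char) (h : l.length ≤ fuel) :
    PySem.Chars.replace.go [' '] [] fuel l acc
      = acc.reverse ++ l.filter (fun c => !(c == ' ')) := by
  induction fuel generalizing l acc with
  | zero =>
    interval_cases hl : l.length
    · simp at hl; subst hl; simp [PySem.Chars.replace.go]
  | succ n ih =>
    cases l with
    | nil => simp [PySem.Chars.replace.go]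
    | cons c t =>
      simp only [PySem.Chars.replace.go]
      by_cases hc : c = ' '
      · subst hc
        rw [if_pos (by simp [List.isPrefixOf])]
        simp only [List.length_cons, List.length_nil, List.drop_succ_cons, List.drop_zero,
          List.reverse_nil, List.nil_append, Nat.zero_add]
        rw [ih t acc (by simpa using Nat.le_of_succ_le_succ h)]
        simp
      · rw [if_neg (by simp [List.isPrefixOf]; exact fun h => hc h.symm)]
        rw [ih t (c :: acc) (by simpa using Nat.le_of_succ_le_succ h)]
        simp [hc]

theorem replace_space_eq_filter (cs : List Char) :
    PySem.Chars.replace cs [' '] [] = cs.filter (fun c => !(c == ' ')) := by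
  rw [PySem.Chars.replace]
  rw [if_neg (by simp)]
  simpa using replace_go_space cs.length cs [] le_rfl

-- a conditional +1 fold is countP
theorem foldl_count (p : Char → Bool) (l : List Char) (a : Nat) :
    l.foldl (fun acc c => if p c then acc + 1 else acc) a = a + l.countP p := by
  induction l generalizing a with
  | nil => simp
  | cons c t ih =>
    by_cases hc : p c <;> simp [hc, ih] <;> omega

-- disjoint classes never overcount the length
theorem countP_disjoint_le (p : Char → Bool) (l : List Char) (hp : p ' ' = false) :
    l.countP p + l.countP (fun c => c == ' ') ≤ l.length := by
  induction l with
  | nil => simp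
  | cons c t ih =>
    by_cases hc : c = ' '
    · subst hc; simp [List.countP_cons, hp]; omega
    · simp [List.countP_cons, hc]
      by_cases hpc : p c <;> simp [hpc] <;> omega

-- the boolean all-scan over the space-filtered list equals the count comparison
theorem all_filter_eq_count (p : Char → Bool) (l : List Char) (hp : p ' ' = false) :
    (l.filter (fun c => !(c == ' '))).all p
      = (l.countP p + l.countP (fun c => c == ' ') == l.length) := by
  induction l with
  | nil => simp
  | cons c t ih =>
    simp only [List.filter_cons, List.countP_cons, List.length_cons]
    by_cases hc : c = ' '
    · subst hc
      simp [hp, ih]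
      omega
    · by_cases hpc : p c
      · simp [hc, hpc, ih]
        omega
      · have hle := countP_disjoint_le p t hp
        simp [hc, hpc]
        omega

-- ===== VERDICT (by name: the statement is the Claim_ definition above) =====
theorem check_spec : Claim_equal_check := by
  intro s _
  unfold Spec_check check check_alt
  simp only [PySem.Str.replace, show (" " : String).toList = [' '] from rfl,
    show ("" : String).toList = ([] : List Char) from rfl, replace_space_eq_filter,
    String.toList_ofList, foldl_count, Nat.zero_add]
  rw [all_filter_eq_count (fun char => PySem.Chars.isalpha char) s.toList (by decide),
      all_filter_eq_count (fun char => PySem.Chars.isdigit char) s.toList (by decide)]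
  simp only [String.length_toList]
  by_cases h1 : s.toList.countP (fun char => PySem.Chars.isalpha char)
      + s.toList.countP (fun c => c == ' ') = s.length
  · simp [h1]
  · by_cases h2 : s.toList.countP (fun char => PySem.Chars.isdigit char)
        + s.toList.countP (fun c => c == ' ') = s.length
    · simp [h1, h2]
    · simp [h1, h2]
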